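-- pv_equiv track=rewrite | github.com/samudraneel05/CP-sheet | 31st july/q5.py | min_weird_shop_cost
-- ===== SOURCE A (Python) =====
-- from collections import deque
--
-- def min_weird_shop_cost(A, B):
--     n = len(A)
--     best = float('inf')
--     A2 = A + A  # length 2n
--
--     for R in range(n):   # window size w=R+1
--         w = R+1
--         s = 0
--         dq = deque()
--
--         # Compute sliding window min for first n windows
--         for i in range(len(A2)):
--             # remove elements not useful (larger than current)
--             while dq and A2[dq[-1]] >= A2[i]:
--                 dq.pop()
--             dq.append(i)
--
--             # remove elements out of the window
--             if dq[0] <= i - w: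
--                 dq.popleft()
--
--             # starting from i>=w-1, we have a valid window
--             if i >= w-1 and i - (w-1) < n:
--                 s += A2[dq[0]]
--
--         cost = s + R * B
--         best = min(best, cost)
--
--     return best
-- ===== SOURCE B (Python) =====
-- def min_weird_shop_cost(A, B):
--     # Transposed accumulation: one pass per start j, maintaining a running
--     # prefix minimum, accumulates every window length's min-sum at once.
--     n = len(A)
--     A2 = A + A
--     sums = [0] * n  # sums[k] = sum over starts j of min(A2[j:j+k+1])
--     for j in range(n):
--         m = A2[j]
--         for k in range(n):
--             v = A2[j + k]
--             if v < m:
--                 m = v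
--             sums[k] += m
--     return min(sums[k] + k * B for k in range(n))
-- ===== Notes on version B (the rewrite author's own statement) =====
-- stated objective: faster
-- what changed: Replaced the per-window-size sliding-window-minimum deque (outer loop over sizes, inner deque pass) by a transposed accumulation: one pass per start index maintaining a running prefix minimum that adds every window length's minimum into a per-length sums array in a single sweep, with no deque at all.
-- outside the precondition, e.g. on min_weird_shop_cost([], 0): A returns inf, B raises ValueError
import Mathlib
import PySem

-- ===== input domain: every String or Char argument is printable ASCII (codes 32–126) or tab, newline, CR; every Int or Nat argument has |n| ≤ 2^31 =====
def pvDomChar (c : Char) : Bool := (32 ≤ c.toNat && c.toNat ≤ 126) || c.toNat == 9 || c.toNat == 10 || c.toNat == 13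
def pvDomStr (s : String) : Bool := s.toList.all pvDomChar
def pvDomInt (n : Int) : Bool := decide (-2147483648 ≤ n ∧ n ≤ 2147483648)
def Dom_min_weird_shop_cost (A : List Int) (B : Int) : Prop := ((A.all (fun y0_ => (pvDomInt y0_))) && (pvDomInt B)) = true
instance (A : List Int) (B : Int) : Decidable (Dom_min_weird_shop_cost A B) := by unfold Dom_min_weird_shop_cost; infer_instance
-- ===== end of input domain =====

-- B replaces the per-window-size deque passes by a transposed single sweep per start index
-- with a running prefix minimum (objective: faster by a constant factor, same O(n^2)).


-- ===== PORT A =====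
-- the deque dq is kept REVERSED (head = Python's back dq[-1]); all indices into A2 are
-- positions produced by range(len(A2)) or stored deque entries, always in range, so
-- A2.getD i 0 is exact for Python's A2[i].
def pvPopWhile (A2 : List Int) (x : Int) : List Nat → List Nat
  | [] => []
  | d :: rest => if x ≤ A2.getD d 0 then pvPopWhile A2 x rest else d :: rest

def pvStepA (A2 : List Int) (n w : Nat) (st : Int × List Nat) (i : Nat) : Int × List Nat :=
  let rdq1 := pvPopWhile A2 (A2.getD i 0) st.2          -- while dq and A2[dq[-1]] >= A2[i]: dq.pop()
  let rdq2 := i :: rdq1                                  -- dq.append(i)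
  let f : Nat := rdq2.getLast?.getD 0
  let rdq3 := if (f : Int) ≤ (i : Int) - (w : Int)
              then rdq2.dropLast else rdq2               -- if dq[0] <= i - w: dq.popleft()
  let s := if ((w : Int) - 1 ≤ (i : Int) ∧ (i : Int) - ((w : Int) - 1) < (n : Int))
           then st.1 + A2.getD (rdq3.getLast?.getD 0) 0 else st.1   -- s += A2[dq[0]]
  (s, rdq3)

def min_weird_shop_cost (A : List Int) (B : Int) : Int :=
  let n := A.length
  let A2 := A ++ A
  (((List.range n).foldl (fun (best : Option Int) R =>
      let w : Nat := R + 1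
      let s := ((List.range A2.length).foldl (pvStepA A2 n w) (0, [])).1
      let cost := s + (R : Int) * B
      match best with
      | none => some cost                               -- min(inf, cost) = cost
      | some b => some (min b cost)) none).getD 0)      -- best = min(best, cost); getD unreachable under Pre_

-- ===== PORT B =====
def pvStepB (A2 : List Int) (j : Nat) (p : Int × List Int) (k : Nat) : Int × List Int :=
  let v := A2.getD (j + k) 0
  let m := if v < p.1 then v else p.1
  (m, p.2.set k (p.2.getD k 0 + m))                     -- sums[k] += m  (k < len(sums) always)

def min_weird_shop_cost_alt (A : List Int) (B : Int) : Int :=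
  let n := A.length
  let A2 := A ++ A
  let sums := (List.range n).foldl (fun sums j =>
      ((List.range n).foldl (pvStepB A2 j) (A2.getD j 0, sums)).2) (List.replicate n (0 : Int))
  (((List.range n).foldl (fun (best : Option Int) k =>
      let c := sums.getD k 0 + (k : Int) * B
      match best with
      | none => some c
      | some b => some (min b c)) none).getD 0)         -- min(generator); getD unreachable under Pre_

-- ===== PRECONDITION & SPEC =====
-- Pre_ excludes only the empty list, on which A returns float('inf') — not an int — and B raises ValueError.
def Pre_min_weird_shop_cost (A : List Int) (B : Int) : Prop := A ≠ []
instance (A : List Int) (B : Int) : Decidable (Pre_min_weird_shop_cost A B) := by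
  unfold Pre_min_weird_shop_cost; infer_instance
def pvWitness_min_weird_shop_cost : List Int × Int := ([3, -1, 4], 2)

def Spec_min_weird_shop_cost (A : List Int) (B : Int) (out : Int) : Prop := out = min_weird_shop_cost_alt A B
instance (A : List Int) (B : Int) (out : Int) : Decidable (Spec_min_weird_shop_cost A B out) := by unfold Spec_min_weird_shop_cost; infer_instance

-- ===== CLAIM (what is proved, stated in full; the proofs are below) =====
def Claim_equal_min_weird_shop_cost : Prop := ∀ (A : List Int) (B : Int), Dom_min_weird_shop_cost A B → Pre_min_weird_shop_cost A B → Spec_min_weird_shop_cost A B (min_weird_shop_cost A B)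

-- ===== LEMMAS AND PROOFS =====

def pvWMin (A2 : List Int) (j : Nat) : Nat → Int
  | 0 => A2.getD j 0
  | k + 1 => min (pvWMin A2 j k) (A2.getD (j + (k + 1)) 0)

def pvCanon (A2 : List Int) (n : Nat) (B : Int) : Int :=
  (((List.range n).foldl (fun (best : Option Int) k =>
      let c := (∑ j ∈ Finset.range n, pvWMin A2 j k) + (k : Int) * B
      match best with
      | none => some c
      | some b => some (min b c)) none).getD 0)

theorem pvWMin_le (A2 : List Int) (j : Nat) {t k : Nat} (h : t ≤ k) :
    pvWMin A2 j k ≤ A2.getD (j + t) 0 := by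
  induction k with
  | zero => interval_cases t; simp [pvWMin]
  | succ k ih =>
    rcases Nat.lt_or_ge t (k + 1) with h' | h'
    · exact le_trans (min_le_left _ _) (ih (by omega))
    · have : t = k + 1 := by omega
      subst this; exact min_le_right _ _

theorem pvWMin_exists (A2 : List Int) (j k : Nat) :
    ∃ t ≤ k, pvWMin A2 j k = A2.getD (j + t) 0 := by
  induction k with
  | zero => exact ⟨0, le_refl _, rfl⟩
  | succ k ih =>
    obtain ⟨t, ht, he⟩ := ih
    have hstep : pvWMin A2 j (k + 1) = min (pvWMin A2 j k) (A2.getD (j + (k + 1)) 0) := rfl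
    rcases le_total (pvWMin A2 j k) (A2.getD (j + (k + 1)) 0) with h | h
    · exact ⟨t, by omega, by rw [hstep, min_eq_left h, he]⟩
    · exact ⟨k + 1, le_refl _, by rw [hstep, min_eq_right h]⟩

theorem pvWMin_step (A2 : List Int) (j k : Nat) :
    pvWMin A2 j k = min (pvWMin A2 j (k - 1)) (A2.getD (j + k) 0) := by
  cases k with
  | zero => simp [pvWMin]
  | succ k => rfl

theorem pvIfLtMin (a b : Int) : (if b < a then b else a) = min a b := by
  rw [min_def]; split_ifs <;> omega

theorem pvB_inner (A2 : List Int) (j : Nat) (sums : List Int) (t : Nat) :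
    (((List.range t).foldl (pvStepB A2 j) (A2.getD j 0, sums)).1 = pvWMin A2 j (t - 1)) ∧
    (((List.range t).foldl (pvStepB A2 j) (A2.getD j 0, sums)).2.length = sums.length) ∧
    (∀ k, k < t → k < sums.length →
      ((List.range t).foldl (pvStepB A2 j) (A2.getD j 0, sums)).2.getD k 0
        = sums.getD k 0 + pvWMin A2 j k) ∧
    (∀ k, t ≤ k →
      ((List.range t).foldl (pvStepB A2 j) (A2.getD j 0, sums)).2.getD k 0 = sums.getD k 0) := by
  induction t with
  | zero => simp [pvWMin]
  | succ t ih =>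
    obtain ⟨h1, h2, h3, h4⟩ := ih
    rw [List.range_succ, List.foldl_append, List.foldl_cons, List.foldl_nil]
    set r := (List.range t).foldl (pvStepB A2 j) (A2.getD j 0, sums) with hr
    have hm : (if A2.getD (j + t) 0 < r.1 then A2.getD (j + t) 0 else r.1) = pvWMin A2 j t := by
      rw [h1, pvIfLtMin, ← pvWMin_step]
    refine ⟨?_, ?_, ?_, ?_⟩
    · simpa [pvStepB] using hm
    · simp [pvStepB, h2]
    · intro k hk hks
      by_cases hkt : k = t
      · subst hkt
        have hlen : k < r.2.length := by omega
        simp only [pvStepB, List.getD_eq_getElem?_getD, List.getElem?_set_self hlen]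
        simp only [← List.getD_eq_getElem?_getD]
        rw [hm, h4 k (le_refl _)]
        simp
      · simp only [pvStepB, List.getD_eq_getElem?_getD, List.getElem?_set_ne (by omega : t ≠ k)]
        simp only [← List.getD_eq_getElem?_getD]
        exact h3 k (by omega) hks
    · intro k hk
      simp only [pvStepB, List.getD_eq_getElem?_getD, List.getElem?_set_ne (by omega : t ≠ k)]
      simp only [← List.getD_eq_getElem?_getD]
      exact h4 k (by omega)

theorem pvB_outer (A2 : List Int) (n : Nat) (t : Nat) :
    (((List.range t).foldl (fun sums j =>
        ((List.range n).foldl (pvStepB A2 j) (A2.getD j 0, sums)).2)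
      (List.replicate n (0 : Int))).length = n) ∧
    (∀ k, k < n →
      ((List.range t).foldl (fun sums j =>
          ((List.range n).foldl (pvStepB A2 j) (A2.getD j 0, sums)).2)
        (List.replicate n (0 : Int))).getD k 0 = ∑ j ∈ Finset.range t, pvWMin A2 j k) := by
  induction t with
  | zero => simp
  | succ t ih =>
    obtain ⟨h1, h2⟩ := ih
    rw [List.range_succ, List.foldl_append, List.foldl_cons, List.foldl_nil]
    set sums := (List.range t).foldl (fun sums j =>
        ((List.range n).foldl (pvStepB A2 j) (A2.getD j 0, sums)).2)
      (List.replicate n (0 : Int)) with hs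
    obtain ⟨g1, g2, g3, g4⟩ := pvB_inner A2 t sums n
    refine ⟨by rw [g2, h1], ?_⟩
    intro k hk
    rw [g3 k hk (by omega), h2 k hk, Finset.sum_range_succ]

theorem pvFoldlCongrMem {α β : Type} (l : List β) (f g : α → β → α) (init : α)
    (h : ∀ (a : α) (b : β), b ∈ l → f a b = g a b) : l.foldl f init = l.foldl g init := by
  induction l generalizing init with
  | nil => rfl
  | cons b rest ih =>
    rw [List.foldl_cons, List.foldl_cons, h init b (List.mem_cons_self ..)]
    exact ih _ (fun a b' hb' => h a b' (List.mem_cons_of_mem _ hb'))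

theorem pvB_value (A : List Int) (B : Int) :
    min_weird_shop_cost_alt A B = pvCanon (A ++ A) A.length B := by
  unfold min_weird_shop_cost_alt pvCanon
  simp only []
  congr 1
  apply pvFoldlCongrMem
  intro best k hk
  rw [(pvB_outer (A ++ A) A.length A.length).2 k (List.mem_range.mp hk)]

def pvInv (A2 : List Int) (w i : Nat) (rdq : List Nat) : Prop :=
  rdq.head? = some i ∧
  rdq.Pairwise (fun d e => e < d ∧ A2.getD e 0 < A2.getD d 0) ∧
  (∀ d ∈ rdq, i + 1 - w ≤ d ∧ d ≤ i) ∧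
  (∀ j, i + 1 - w ≤ j → j ≤ i → ∃ d ∈ rdq, j ≤ d ∧ A2.getD d 0 ≤ A2.getD j 0)

theorem pvPopWhile_sublist (A2 : List Int) (x : Int) (l : List Nat) :
    (pvPopWhile A2 x l).Sublist l := by
  induction l with
  | nil => simp [pvPopWhile]
  | cons d rest ih =>
    simp only [pvPopWhile]
    split_ifs
    · exact ih.trans (List.sublist_cons_self _ _)
    · exact List.Sublist.refl _

theorem pvPopWhile_mem_or (A2 : List Int) (x : Int) (l : List Nat) (d : Nat) (hd : d ∈ l) :
    d ∈ pvPopWhile A2 x l ∨ x ≤ A2.getD d 0 := by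
  induction l with
  | nil => cases hd
  | cons e rest ih =>
    simp only [pvPopWhile]
    split_ifs with h
    · rcases List.mem_cons.mp hd with rfl | hmem
      · exact Or.inr h
      · exact ih hmem
    · exact Or.inl hd

theorem pvPopWhile_val (A2 : List Int) (x : Int) (l : List Nat)
    (hp : l.Pairwise (fun d e => e < d ∧ A2.getD e 0 < A2.getD d 0)) :
    ∀ d ∈ pvPopWhile A2 x l, A2.getD d 0 < x := by
  induction l with
  | nil => simp [pvPopWhile]
  | cons e rest ih =>
    simp only [pvPopWhile]
    split_ifs with h
    · exact ih (List.Pairwise.of_cons hp)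
    · intro d hd
      rcases List.mem_cons.mp hd with rfl | hmem
      · omega
      · have := (List.pairwise_cons.mp hp).1 d hmem
        omega

-- Pairwise relation between every dropLast element and the last element

theorem pvPairwise_last {R : Nat → Nat → Prop} (l : List Nat) (h : l ≠ [])
    (hp : l.Pairwise R) : ∀ d ∈ l.dropLast, R d (l.getLast h) := by
  intro d hd
  have hdecomp := List.dropLast_append_getLast h
  rw [← hdecomp] at hp
  exact (List.pairwise_append.mp hp).2.2 d hd (l.getLast h) (List.mem_singleton.mpr rfl)

theorem pvMem_dropLast_or (l : List Nat) (h : l ≠ []) (d : Nat) (hd : d ∈ l) :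
    d ∈ l.dropLast ∨ d = l.getLast h := by
  have hdecomp := List.dropLast_append_getLast h
  rw [← hdecomp] at hd
  rcases List.mem_append.mp hd with h1 | h1
  · exact Or.inl h1
  · exact Or.inr (List.mem_singleton.mp h1)

theorem pvStepA_base (A2 : List Int) (n w : Nat) (hw : 1 ≤ w) (s : Int) :
    pvInv A2 w 0 (pvStepA A2 n w (s, []) 0).2 := by
  have h0 : (pvStepA A2 n w (s, []) 0).2 = [0] := by
    simp only [pvStepA, pvPopWhile]
    split_ifs with h
    · exfalso; simp at h; omega
    · rfl
  rw [h0]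
  refine ⟨rfl, by simp, fun d hd => by simp at hd; omega, ?_⟩
  intro j _ hj
  interval_cases j
  exact ⟨0, by simp⟩

theorem pvStepA_inv (A2 : List Int) (n w : Nat) (hw : 1 ≤ w) (st : Int × List Nat) (i : Nat)
    (hinv : pvInv A2 w i st.2) : pvInv A2 w (i + 1) (pvStepA A2 n w st (i + 1)).2 := by
  obtain ⟨hh, hp, hb, hc⟩ := hinv
  set rdq := st.2 with hrdq
  set x := A2.getD (i + 1) 0 with hx
  set rdq1 := pvPopWhile A2 x rdq with hrdq1
  set rdq2 := (i + 1) :: rdq1 with hrdq2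
  have hne2 : rdq2 ≠ [] := by simp [hrdq2]
  set f := rdq2.getLast?.getD 0 with hfdef
  have hfeq : f = rdq2.getLast hne2 := by
    rw [hfdef, List.getLast?_eq_some_getLast hne2]; rfl
  have hsub1 : ∀ d ∈ rdq1, d ∈ rdq := fun d hd => (pvPopWhile_sublist A2 x rdq).mem hd
  have hp1 : rdq1.Pairwise (fun d e => e < d ∧ A2.getD e 0 < A2.getD d 0) :=
    hp.sublist (pvPopWhile_sublist A2 x rdq)
  have hlt1 : ∀ d ∈ rdq1, A2.getD d 0 < x := pvPopWhile_val A2 x rdq hp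
  have hp2 : rdq2.Pairwise (fun d e => e < d ∧ A2.getD e 0 < A2.getD d 0) := by
    rw [hrdq2, List.pairwise_cons]
    refine ⟨fun d hd => ⟨?_, hlt1 d hd⟩, hp1⟩
    have := (hb d (hsub1 d hd)).2; omega
  have hb2 : ∀ d ∈ rdq2, i + 1 - w ≤ d ∧ d ≤ i + 1 := by
    intro d hd
    rcases List.mem_cons.mp hd with rfl | hd1
    · omega
    · have := hb d (hsub1 d hd1); omega
  have hfmem : f ∈ rdq2 := by rw [hfeq]; exact List.getLast_mem hne2
  have hfmin : ∀ d ∈ rdq2, f ≤ d := by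
    intro d hd
    rcases pvMem_dropLast_or rdq2 hne2 d hd with h1 | h1
    · have := (pvPairwise_last rdq2 hne2 hp2 d h1).1
      omega
    · omega
  have hstep2 : (pvStepA A2 n w st (i + 1)).2
      = if (f : Int) ≤ ((i + 1 : Nat) : Int) - (w : Int) then rdq2.dropLast else rdq2 := rfl
  by_cases hcond : (f : Int) ≤ ((i + 1 : Nat) : Int) - (w : Int)
  · -- popleft fires
    rw [hstep2, if_pos hcond]
    have hfbound := hb2 f hfmem
    have hfiw : i + 1 ≥ w ∧ f = i + 1 - w := by
      constructor <;> [skip; skip] <;> omega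
    have hrdq1ne : rdq1 ≠ [] := by
      intro hnil
      have hfv : f = i + 1 := by rw [hfdef, hrdq2, hnil]; rfl
      omega
    obtain ⟨b, tl, hbtl⟩ := List.exists_cons_of_ne_nil hrdq1ne
    have hdrop : rdq2.dropLast = (i + 1) :: rdq1.dropLast := by
      rw [hrdq2, hbtl]; rfl
    refine ⟨by rw [hdrop]; rfl, hp2.sublist (List.dropLast_sublist rdq2), ?_, ?_⟩
    · intro d hd
      have hd2 : d ∈ rdq2 := (List.dropLast_sublist rdq2).mem hd
      have h1 := hb2 d hd2
      have hgt := (pvPairwise_last rdq2 hne2 hp2 d hd).1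
      rw [← hfeq] at hgt
      omega
    · intro j hj1 hj2
      by_cases hji : j = i + 1
      · subst hji
        exact ⟨i + 1, by rw [hdrop]; exact List.mem_cons_self .., le_refl _, le_refl _⟩
      · have hj2' : j ≤ i := by omega
        obtain ⟨d, hd, hjd, hval⟩ := hc j (by omega) hj2'
        rcases pvPopWhile_mem_or A2 x rdq d hd with hd1 | hxd
        · have hd2 : d ∈ rdq2 := by rw [hrdq2]; exact List.mem_cons_of_mem _ hd1
          rcases pvMem_dropLast_or rdq2 hne2 d hd2 with hdl | hlast
          · exact ⟨d, hdl, hjd, hval⟩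
          · exfalso
            -- d = getLast = f ≤ i+1-w but j ≤ d and j ≥ i+2-w
            rw [← hfeq] at hlast
            omega
        · refine ⟨i + 1, by rw [hdrop]; exact List.mem_cons_self .., by omega, ?_⟩
          calc A2.getD (i+1) 0 ≤ A2.getD d 0 := hxd
          _ ≤ A2.getD j 0 := hval
  · -- no popleft
    rw [hstep2, if_neg hcond]
    refine ⟨rfl, hp2, ?_, ?_⟩
    · intro d hd
      have h1 := hb2 d hd
      have h2 := hfmin d hd
      omega
    · intro j hj1 hj2
      by_cases hji : j = i + 1
      · subst hji
        exact ⟨i + 1, List.mem_cons_self .., le_refl _, le_refl _⟩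
      · have hj2' : j ≤ i := by omega
        obtain ⟨d, hd, hjd, hval⟩ := hc j (by omega) hj2'
        rcases pvPopWhile_mem_or A2 x rdq d hd with hd1 | hxd
        · exact ⟨d, by rw [hrdq2]; exact List.mem_cons_of_mem _ hd1, hjd, hval⟩
        · refine ⟨i + 1, List.mem_cons_self .., by omega, ?_⟩
          calc A2.getD (i+1) 0 ≤ A2.getD d 0 := hxd
          _ ≤ A2.getD j 0 := hval

theorem pvFront_eq (A2 : List Int) (w i : Nat) (rdq : List Nat) (hw : 1 ≤ w) (hi : w - 1 ≤ i)
    (hinv : pvInv A2 w i rdq) :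
    A2.getD (rdq.getLast?.getD 0) 0 = pvWMin A2 (i - (w - 1)) (w - 1) := by
  obtain ⟨hh, hp, hb, hc⟩ := hinv
  have hne : rdq ≠ [] := by intro h; rw [h] at hh; cases hh
  have hfeq : rdq.getLast?.getD 0 = rdq.getLast hne := by
    rw [List.getLast?_eq_some_getLast hne]; rfl
  set f := rdq.getLast hne with hf
  rw [hfeq]
  have hfmem : f ∈ rdq := List.getLast_mem hne
  have hfminval : ∀ d ∈ rdq, A2.getD f 0 ≤ A2.getD d 0 := by
    intro d hd
    rcases pvMem_dropLast_or rdq hne d hd with h1 | h1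
    · exact le_of_lt (pvPairwise_last rdq hne hp d h1).2
    · rw [h1]
  have hlo : i + 1 - w = i - (w - 1) := by omega
  set lo := i - (w - 1) with hlodef
  have hfb := hb f hfmem
  apply le_antisymm
  · -- f is value-minimal and coverage gives it ≤ the true min
    obtain ⟨t, ht, he⟩ := pvWMin_exists A2 lo (w - 1)
    obtain ⟨d, hd, _, hval⟩ := hc (lo + t) (by omega) (by omega)
    rw [he]
    exact le_trans (hfminval d hd) hval
  · -- pvWMin ≤ value at f
    have : lo + (f - lo) = f := by omega
    calc pvWMin A2 lo (w - 1) ≤ A2.getD (lo + (f - lo)) 0 := pvWMin_le A2 lo (by omega)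
    _ = A2.getD f 0 := by rw [this]

def pvContrib (A2 : List Int) (n w i : Nat) : Int :=
  if w - 1 ≤ i ∧ i < n + (w - 1) then pvWMin A2 (i - (w - 1)) (w - 1) else 0

theorem pvStepA_fst (A2 : List Int) (n w : Nat) (st : Int × List Nat) (i : Nat) :
    (pvStepA A2 n w st i).1
      = if ((w : Int) - 1 ≤ (i : Int) ∧ (i : Int) - ((w : Int) - 1) < (n : Int))
        then st.1 + A2.getD ((pvStepA A2 n w st i).2.getLast?.getD 0) 0 else st.1 := rfl

theorem pvA_inner (A2 : List Int) (n w : Nat) (hw : 1 ≤ w) (t : Nat) (ht : 1 ≤ t) :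
    pvInv A2 w (t - 1) (((List.range t).foldl (pvStepA A2 n w) (0, [])).2) ∧
    ((List.range t).foldl (pvStepA A2 n w) (0, [])).1
      = ∑ i ∈ Finset.range t, pvContrib A2 n w i := by
  induction t with
  | zero => omega
  | succ t ih =>
    rcases Nat.eq_zero_or_pos t with rfl | hpos
    · -- t+1 = 1
      constructor
      · simpa using pvStepA_base A2 n w hw 0
      · rw [show List.range 1 = [0] from rfl, List.foldl_cons, List.foldl_nil,
          Finset.sum_range_one, pvStepA_fst]
        have h0 : (pvStepA A2 n w (0, []) 0).2 = [0] := by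
          simp only [pvStepA, pvPopWhile]
          split_ifs with h
          · exfalso; simp at h; omega
          · rfl
        unfold pvContrib
        rw [h0]
        split_ifs with h1 h2 h2
        · -- w = 1 and 0 < n
          have hw1 : w = 1 := by simp at h1; omega
          subst hw1
          simp [pvWMin]
        · exfalso; simp at h1 h2; omega
        · exfalso; simp at h1 h2; omega
        · rfl
    · obtain ⟨ih1, ih2⟩ := ih hpos
      rw [List.range_succ, List.foldl_append, List.foldl_cons, List.foldl_nil]
      set r := (List.range t).foldl (pvStepA A2 n w) (0, []) with hr
      have hstep : pvInv A2 w t (pvStepA A2 n w r t).2 := by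
        have := pvStepA_inv A2 n w hw r (t - 1) ih1
        rwa [show t - 1 + 1 = t from by omega] at this
      refine ⟨by simpa using hstep, ?_⟩
      rw [pvStepA_fst, Finset.sum_range_succ, ← ih2]
      unfold pvContrib
      split_ifs with h1 h2 h2
      · -- both conditions hold
        have hwt : w - 1 ≤ t := by omega
        rw [pvFront_eq A2 w t (pvStepA A2 n w r t).2 hw hwt hstep]
      · exfalso; omega
      · exfalso; omega
      · simp

theorem pvReindex (A2 : List Int) (n w : Nat) (hw : 1 ≤ w) (hwn : w ≤ n) :
    ∑ i ∈ Finset.range (n + n), pvContrib A2 n w i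
      = ∑ j ∈ Finset.range n, pvWMin A2 j (w - 1) := by
  have hsub : Finset.Ico (w - 1) (n + (w - 1)) ⊆ Finset.range (n + n) := by
    intro i hi; rw [Finset.mem_range]; have := Finset.mem_Ico.mp hi; omega
  rw [← Finset.sum_subset hsub
        (fun i _ hni => by unfold pvContrib; rw [if_neg]; intro h; exact hni (Finset.mem_Ico.mpr ⟨h.1, h.2⟩))]
  rw [Finset.sum_Ico_eq_sum_range]
  have hn : n + (w - 1) - (w - 1) = n := by omega
  rw [hn]
  apply Finset.sum_congr rfl
  intro i hi
  have hi' := Finset.mem_range.mp hi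
  unfold pvContrib
  rw [if_pos ⟨by omega, by omega⟩, show w - 1 + i - (w - 1) = i from by omega]

theorem pvA_value (A : List Int) (B : Int) (hA : A ≠ []) :
    min_weird_shop_cost A B = pvCanon (A ++ A) A.length B := by
  have hn1 : 1 ≤ A.length := List.length_pos_of_ne_nil hA
  have hlen : (A ++ A).length = A.length + A.length := List.length_append
  unfold min_weird_shop_cost pvCanon
  dsimp only
  congr 1
  apply pvFoldlCongrMem
  intro best R hR
  have hR' := List.mem_range.mp hR
  have hs := (pvA_inner (A ++ A) A.length (R + 1) (by omega) (A ++ A).length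
      (by rw [hlen]; omega)).2
  rw [hs]
  rw [hlen, pvReindex (A ++ A) A.length (R + 1) (by omega) (by omega)]
  simp

-- ===== VERDICT (by name: the statement is the Claim_ definition above) =====
theorem min_weird_shop_cost_spec : Claim_equal_min_weird_shop_cost := by
  intro A B _ hPre
  unfold Spec_min_weird_shop_cost
  rw [pvA_value A B hPre, pvB_value A B]
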